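-- pv_equiv track=rewrite | github.com/pypi-data/pypi-mirror-96 | packages/torchplus/torchplus-0.2.6.tar.gz/torchplus-0.2.6/torchplus/tensor.py | _replace_key_with_sequence
-- ===== SOURCE A (Python) =====
-- def _replace_key_with_sequence(original, sequence, key=-1):
--     sequence = list(sequence)
--     assert original.count(key) == len(sequence)
--     result = list()
--     index = 0
--     for t in original:
--         if t == key:
--             result.append(sequence[index])
--             index += 1
--         else:
--             result.append(t)
--     return original.__class__(result)
-- ===== SOURCE B (Python) =====
-- def _replace_key_with_sequence(original, sequence, key=-1):
--     sequence = list(sequence)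
--     assert original.count(key) == len(sequence)
--     positions = [i for i, t in enumerate(original) if t == key]
--     result = list(original)
--     for pos, val in zip(positions, sequence):
--         result[pos] = val
--     return original.__class__(result)
-- ===== Notes on version B (the rewrite author's own statement) =====
-- stated objective: alternative
-- what changed: B first builds an explicit index table of the key's positions and then assigns the sequence values into a copy of the list at those positions, instead of A's single pass that appends while substituting inline and carrying a running index into sequence.
import Mathlib
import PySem

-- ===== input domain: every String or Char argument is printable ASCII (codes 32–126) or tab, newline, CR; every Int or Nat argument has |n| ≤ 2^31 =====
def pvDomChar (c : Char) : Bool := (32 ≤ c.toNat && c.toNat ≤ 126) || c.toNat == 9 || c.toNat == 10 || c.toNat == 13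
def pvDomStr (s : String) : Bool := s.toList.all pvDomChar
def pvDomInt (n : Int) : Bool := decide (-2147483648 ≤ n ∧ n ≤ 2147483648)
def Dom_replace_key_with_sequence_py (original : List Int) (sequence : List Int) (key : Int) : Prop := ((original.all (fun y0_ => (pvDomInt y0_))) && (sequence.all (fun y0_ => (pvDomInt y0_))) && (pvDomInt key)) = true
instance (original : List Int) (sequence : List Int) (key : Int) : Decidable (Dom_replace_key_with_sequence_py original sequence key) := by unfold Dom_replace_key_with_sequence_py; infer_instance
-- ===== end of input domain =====

-- B builds an explicit table of the key's positions, then assigns the sequence values into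
-- a copy of the list at those positions (alternative decomposition; same exact return value).


-- ===== PORT A =====
-- A's loop: append while substituting, carrying a running index into sequence.
-- (The assert's failure is excluded by Pre_; under Pre_ the index is always in range,
-- so the '.getD 0' default of the pyGet? access never fires.)
def replace_key_with_sequence_py (original : List Int) (sequence : List Int) (key : Int) : List Int :=
  (original.foldl (fun (acc : List Int × Nat) t =>
      if t = key then (acc.1 ++ [(PySem.List.pyGet? sequence (acc.2 : Int)).getD 0], acc.2 + 1)
      else (acc.1 ++ [t], acc.2)) ([], 0)).1

-- ===== PORT B =====
-- B: position table of the key, then in-place assignments into a copy of original.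
def replace_key_with_sequence_py_alt (original : List Int) (sequence : List Int) (key : Int) : List Int :=
  let positions := ((PySem.List.enumerate original 0).filter (fun p => p.2 == key)).map Prod.fst
  (positions.zip sequence).foldl (fun res pv => PySem.List.pySetD res pv.1 pv.2) original

-- ===== PRECONDITION & SPEC =====
-- Pre_ excludes exactly the inputs on which A's assert raises AssertionError.
def Pre_replace_key_with_sequence_py (original : List Int) (sequence : List Int) (key : Int) : Prop :=
  original.count key = sequence.length
instance (original : List Int) (sequence : List Int) (key : Int) : Decidable (Pre_replace_key_with_sequence_py original sequence key) := by unfold Pre_replace_key_with_sequence_py; infer_instance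

def pvWitness_replace_key_with_sequence_py : List Int × List Int × Int := ([1, -1, 2, -1], [5, 6], -1)

def Spec_replace_key_with_sequence_py (original : List Int) (sequence : List Int) (key : Int) (out : List Int) : Prop := out = replace_key_with_sequence_py_alt original sequence key
instance (original : List Int) (sequence : List Int) (key : Int) (out : List Int) : Decidable (Spec_replace_key_with_sequence_py original sequence key out) := by unfold Spec_replace_key_with_sequence_py; infer_instance

-- ===== CLAIM (what is proved, stated in full; the proofs are below) =====
def Claim_equal_replace_key_with_sequence_py : Prop := ∀ (original : List Int) (sequence : List Int) (key : Int), Dom_replace_key_with_sequence_py original sequence key → Pre_replace_key_with_sequence_py original sequence key → Spec_replace_key_with_sequence_py original sequence key (replace_key_with_sequence_py original sequence key)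

-- ===== LEMMAS AND PROOFS =====

-- Reference recursion: both ports are proved equal to it (B under Pre_).
def repRef (key : Int) : List Int → List Int → List Int
  | [], _ => []
  | t :: ts, s => if t = key then s.headD 0 :: repRef key ts s.tail else t :: repRef key ts s

lemma afold (key : Int) (sequence : List Int) :
    ∀ (l acc : List Int) (i : Nat),
      (l.foldl (fun (acc : List Int × Nat) t =>
          if t = key then (acc.1 ++ [(PySem.List.pyGet? sequence (acc.2 : Int)).getD 0], acc.2 + 1)
          else (acc.1 ++ [t], acc.2)) (acc, i)).1
        = acc ++ repRef key l (sequence.drop i) := by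
  intro l
  induction l with
  | nil => intro acc i; simp [repRef]
  | cons t ts ih =>
    intro acc i
    rw [List.foldl_cons]
    by_cases ht : t = key
    · rw [if_pos ht, ih]
      simp [repRef, ht, List.head?_drop, List.tail_drop]
    · rw [if_neg ht, ih]
      simp [repRef, ht]

lemma bfold (key : Int) :
    ∀ (l s pre : List Int), l.count key = s.length →
      (((((PySem.List.enumerate l (pre.length : Int)).filter (fun p => p.2 == key)).map Prod.fst).zip s).foldl
          (fun res pv => PySem.List.pySetD res pv.1 pv.2) (pre ++ l))
        = pre ++ repRef key l s := by
  intro l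
  induction l with
  | nil => intro s pre h; simp [PySem.List.enumerate, repRef]
  | cons t ts ih =>
    intro s pre h
    by_cases ht : t = key
    · subst ht
      have hc : ts.count t + 1 = s.length := by simpa using h
      cases s with
      | nil => simp at hc
      | cons v s' =>
        have hcount : ts.count t = s'.length := by simpa using hc
        rw [PySem.List.enumerate_cons, List.filter_cons_of_pos (by simp)]
        simp only [List.map_cons, List.zip_cons_cons, List.foldl_cons, PySem.List.pySetD_natCast]
        rw [show (pre ++ t :: ts).set pre.length v = (pre ++ [v]) ++ ts from by
              simp]
        rw [show ((pre.length : Int) + 1) = (((pre ++ [v]).length : Nat) : Int) from by simp]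
        rw [ih s' (pre ++ [v]) hcount]
        simp [repRef]
    · have hcount : ts.count key = s.length := by simpa [List.count_cons, ht] using h
      rw [PySem.List.enumerate_cons, List.filter_cons_of_neg (by simpa using ht)]
      rw [show pre ++ t :: ts = (pre ++ [t]) ++ ts from by simp]
      rw [show ((pre.length : Int) + 1) = (((pre ++ [t]).length : Nat) : Int) from by simp]
      rw [ih s (pre ++ [t]) hcount]
      simp [repRef, ht]

-- ===== VERDICT (by name: the statement is the Claim_ definition above) =====
theorem replace_key_with_sequence_py_spec : Claim_equal_replace_key_with_sequence_py := by
  intro original sequence key _ hpre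
  unfold Spec_replace_key_with_sequence_py replace_key_with_sequence_py replace_key_with_sequence_py_alt
  have hA := afold key sequence original [] 0
  have hB := bfold key original sequence [] hpre
  simp only [List.drop_zero, List.nil_append] at hA hB
  rw [hA]
  exact hB.symm
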